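-- pv_equiv track=rewrite | github.com/a-bracci00/All_project | 2023/2023_rilevant_script/matrix_operations/script15.py | bandiera
-- ===== SOURCE A (Python) =====
-- def bandiera(n,m):
--     if m % 3 != 0:
--         raise ValueError
--     nuova = []
--     for x in range(n):
--         riga = []
--         for y in range(m):
--             riga.append(y // (m // 3))
--         nuova.append(riga)
--     return nuova
-- ===== SOURCE B (Python) =====
-- def bandiera(n, m):
--     if m % 3 != 0:
--         raise ValueError
--     third = m // 3
--     # column-major construction: m constant columns, then transpose into n rows
--     columns = [[c] * n for c in range(3) for _ in range(third)]
--     return [[col[x] for col in columns] for x in range(n)]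
-- ===== Notes on version B (the rewrite author's own statement) =====
-- stated objective: alternative
-- what changed: Builds the matrix column-major: m constant columns ([c]*n for each colour band, no per-cell division) and then transposes them into the n rows, instead of A's row-major nested loop computing y // (m//3) for every cell.
import Mathlib
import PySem

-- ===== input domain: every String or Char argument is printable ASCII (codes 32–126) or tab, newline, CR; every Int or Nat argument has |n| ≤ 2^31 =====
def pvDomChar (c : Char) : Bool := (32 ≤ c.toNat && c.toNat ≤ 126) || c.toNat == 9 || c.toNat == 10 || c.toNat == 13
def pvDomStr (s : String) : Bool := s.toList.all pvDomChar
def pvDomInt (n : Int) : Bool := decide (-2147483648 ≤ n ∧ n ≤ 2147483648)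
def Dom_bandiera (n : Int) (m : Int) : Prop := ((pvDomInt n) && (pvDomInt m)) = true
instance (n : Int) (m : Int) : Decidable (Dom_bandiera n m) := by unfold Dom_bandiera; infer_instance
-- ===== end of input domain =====

-- B builds the matrix column-major — m constant columns, one per band position, then a
-- transpose pass into the n rows — instead of A's row-major nested loop with a division
-- per cell (objective: alternative).

-- ===== PORT A =====
def bandiera (n : Int) (m : Int) : List (List Int) :=
  if PySem.Int.mod m 3 ≠ 0 then []   -- Python raises ValueError here; excluded by Pre_
  else
    (PySem.List.pyRange 0 n 1).foldl
      (fun nuova _x =>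
        nuova ++ [(PySem.List.pyRange 0 m 1).foldl
          (fun riga y => riga ++ [PySem.Int.floordiv y (PySem.Int.floordiv m 3)]) []])
      []

-- ===== PORT B =====
def bandiera_alt (n : Int) (m : Int) : List (List Int) :=
  if PySem.Int.mod m 3 ≠ 0 then []   -- Python raises ValueError here; excluded by Pre_
  else
    let third := PySem.Int.floordiv m 3
    let columns : List (List Int) :=
      (PySem.List.pyRange 0 3 1).flatMap (fun c =>
        (PySem.List.pyRange 0 third 1).map (fun _ => List.replicate n.toNat c))
    (PySem.List.pyRange 0 n 1).map (fun x =>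
      columns.map (fun col => PySem.List.pyGetD col x 0))

-- ===== PRECONDITION & SPEC =====
-- A raises ValueError exactly when m % 3 ≠ 0; those inputs are excluded.
def Pre_bandiera (_n : Int) (m : Int) : Prop := PySem.Int.mod m 3 = 0
instance (n : Int) (m : Int) : Decidable (Pre_bandiera n m) := by unfold Pre_bandiera; infer_instance
def pvWitness_bandiera : Int × Int := (2, 6)

def Spec_bandiera (n : Int) (m : Int) (out : List (List Int)) : Prop := out = bandiera_alt n m
instance (n : Int) (m : Int) (out : List (List Int)) : Decidable (Spec_bandiera n m out) := by unfold Spec_bandiera; infer_instance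

-- ===== CLAIM (what is proved, stated in full; the proofs are below) =====
def Claim_equal_bandiera : Prop := ∀ (n : Int) (m : Int), Dom_bandiera n m → Pre_bandiera n m → Spec_bandiera n m (bandiera n m)

-- ===== LEMMAS AND PROOFS =====

-- a block [c*t, (c+1)*t) of the range on which y // t is the constant c
theorem block_const (third c : Int)
    (h : ∀ y, c * third ≤ y ∧ y < (c + 1) * third → PySem.Int.floordiv y third = c) :
    (PySem.List.pyRange (c * third) ((c + 1) * third) 1).map
      (fun y => PySem.Int.floordiv y third) = List.replicate third.toNat c := by
  have hcongr : (PySem.List.pyRange (c * third) ((c + 1) * third) 1).map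
      (fun y => PySem.Int.floordiv y third)
      = (PySem.List.pyRange (c * third) ((c + 1) * third) 1).map (fun _ => c) := by
    apply List.map_congr_left
    intro y hy
    rw [PySem.List.mem_pyRange_one] at hy
    exact h y hy
  rw [hcongr, List.map_const', PySem.List.length_pyRange_one]
  have h3 : (c + 1) * third - c * third = third := by ring
  rw [h3]

-- A's inner row is three constant bands
theorem inner_row (m : Int) (hm : PySem.Int.mod m 3 = 0) :
    (PySem.List.pyRange 0 m 1).map (fun y => PySem.Int.floordiv y (PySem.Int.floordiv m 3))
      = List.replicate (PySem.Int.floordiv m 3).toNat 0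
        ++ List.replicate (PySem.Int.floordiv m 3).toNat 1
        ++ List.replicate (PySem.Int.floordiv m 3).toNat 2 := by
  rw [PySem.Int.mod_eq_zero_iff_dvd] at hm
  obtain ⟨t, ht⟩ := hm
  have hthird : PySem.Int.floordiv m 3 = t := by
    rw [ht]; rw [PySem.Int.floordiv_eq_iff_of_pos (by omega)]; omega
  rw [hthird]
  by_cases hpos : 0 < t
  · have hsplit : PySem.List.pyRange 0 m 1
        = PySem.List.pyRange (0 * t) (1 * t) 1 ++ PySem.List.pyRange (1 * t) (2 * t) 1
          ++ PySem.List.pyRange (2 * t) (3 * t) 1 := by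
      rw [← PySem.List.pyRange_one_append (0 * t) (1 * t) (2 * t) (by omega) (by omega),
          ← PySem.List.pyRange_one_append (0 * t) (2 * t) (3 * t) (by omega) (by omega)]
      congr 1; omega
    rw [hsplit, List.map_append, List.map_append]
    congr 1
    · congr 1
      · exact block_const t 0 (fun y hy => by
          rw [PySem.Int.floordiv_eq_iff_of_pos hpos]; omega)
      · exact block_const t 1 (fun y hy => by
          rw [PySem.Int.floordiv_eq_iff_of_pos hpos]; omega)
    · exact block_const t 2 (fun y hy => by
        rw [PySem.Int.floordiv_eq_iff_of_pos hpos]; omega)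
  · have h1 : PySem.List.pyRange 0 m 1 = [] := PySem.List.pyRange_one_eq_nil (by omega)
    have h2 : t.toNat = 0 := by omega
    simp [h1, h2]

-- row x of B's transpose is the same three constant bands, for any x in range(n)
theorem transpose_row (n third : Int) (x : Int) (hx : 0 ≤ x ∧ x < n) :
    ((PySem.List.pyRange 0 3 1).flatMap (fun c =>
        (PySem.List.pyRange 0 third 1).map (fun _ => List.replicate n.toNat c))).map
      (fun col => PySem.List.pyGetD col x 0)
      = List.replicate third.toNat 0 ++ List.replicate third.toNat 1
        ++ List.replicate third.toNat 2 := by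
  have hget : ∀ c : Int, PySem.List.pyGetD (List.replicate n.toNat c) x 0 = c := by
    intro c
    rw [PySem.List.pyGetD_eq_getElem (List.replicate n.toNat c) 0 hx.1 (by simp; omega)]
    simp
  have h3 : PySem.List.pyRange 0 3 1 = [0, 1, 2] := by decide
  have hlen : ∀ c : Int, ((PySem.List.pyRange 0 third 1).map
      (fun _ => List.replicate n.toNat c)).map (fun col => PySem.List.pyGetD col x 0)
      = List.replicate third.toNat c := by
    intro c
    rw [List.map_map]
    have : ((fun col => PySem.List.pyGetD col x 0) ∘ fun _ => List.replicate n.toNat c)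
        = fun (_ : Int) => c := by
      funext y; simp [Function.comp, hget]
    rw [this, List.map_const', PySem.List.length_pyRange_one]
    congr 1; omega
  simp only [h3, List.flatMap_cons, List.flatMap_nil, List.append_nil, List.map_append, hlen]
  rw [List.append_assoc]

-- ===== VERDICT (by name: the statement is the Claim_ definition above) =====
theorem bandiera_spec : Claim_equal_bandiera := by
  intro n m _hdom hpre
  have hp : PySem.Int.mod m 3 = 0 := hpre
  have hd : (3 : Int) ∣ m := (PySem.Int.mod_eq_zero_iff_dvd m 3).mp hp
  unfold Spec_bandiera bandiera bandiera_alt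
  rw [if_neg (by simp [hd]), if_neg (by simp [hd])]
  rw [PySem.List.foldl_append_singleton_eq_map]
  apply List.map_congr_left
  intro x hx
  rw [PySem.List.mem_pyRange_one] at hx
  rw [PySem.List.foldl_append_singleton_eq_map]
  rw [inner_row m hp, transpose_row n (PySem.Int.floordiv m 3) x hx, List.nil_append]
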